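-- pv_equiv track=rewrite | github.com/iceout/aidd-plugin | skills/review/runtime/context_pack.py | _replace_list_section
-- ===== SOURCE A (Python) =====
-- def _replace_list_section(lines: list[str], header: str, items: list[str]) -> list[str]:
--     for idx, line in enumerate(lines):
--         if line.strip() != f"{header}:":
--             continue
--         start = idx + 1
--         end = start
--         while end < len(lines):
--             if lines[end].lstrip().startswith("-"):
--                 end += 1
--                 continue
--             break
--         replacement = [f"- {item}" for item in items] if items else ["- n/a"]
--         return lines[:start] + replacement + lines[end:]
--     return lines
-- ===== SOURCE B (Python) =====
-- def _replace_list_section(lines: list[str], header: str, items: list[str]) -> list[str]: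
--     target = f"{header}:"
--     replacement = [f"- {item}" for item in items] if items else ["- n/a"]
--     out = []
--     replaced = False
--     skipping = False
--     for line in lines:
--         if skipping:
--             if line.lstrip().startswith("-"):
--                 continue
--             skipping = False
--             out.append(line)
--         elif not replaced and line.strip() == target:
--             out.append(line)
--             out.extend(replacement)
--             replaced = True
--             skipping = True
--         else:
--             out.append(line)
--     return out
-- ===== Notes on version B (the rewrite author's own statement) =====
-- stated objective: simpler
-- what changed: Replaced the enumerate+inner-while+slice splicing with a single linear pass that builds the output while tracking replaced/skipping flags, precomputing the target and replacement once instead of rebuilding the header f-string on every line.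
import Mathlib
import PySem

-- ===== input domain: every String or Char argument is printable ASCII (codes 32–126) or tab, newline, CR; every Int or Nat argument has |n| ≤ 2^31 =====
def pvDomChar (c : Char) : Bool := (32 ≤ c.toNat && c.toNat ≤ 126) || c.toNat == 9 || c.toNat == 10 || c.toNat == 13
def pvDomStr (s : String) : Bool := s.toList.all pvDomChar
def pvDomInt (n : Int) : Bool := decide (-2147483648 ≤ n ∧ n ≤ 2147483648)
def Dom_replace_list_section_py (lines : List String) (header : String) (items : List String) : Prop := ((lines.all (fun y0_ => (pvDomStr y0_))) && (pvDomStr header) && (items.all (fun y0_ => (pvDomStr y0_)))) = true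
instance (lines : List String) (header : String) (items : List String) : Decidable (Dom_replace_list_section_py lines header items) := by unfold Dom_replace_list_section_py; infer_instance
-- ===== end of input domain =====

-- B replaces A's enumerate + inner while + slice splicing by one linear pass over the
-- lines with replaced/skipping flags; same return value, no slices or index arithmetic.

-- ===== PORT A =====
-- the inner 'while end < len(lines): if lines[end].lstrip().startswith("-"): end += 1 …'
def pyFindEnd (lines : List String) (e : Nat) : Nat :=
  if e < lines.length then
    if PySem.Str.startswith (PySem.Str.lstrip (lines.getD e "")) "-" then
      pyFindEnd lines (e + 1)
    else e
  else e
termination_by lines.length - e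

-- the 'for idx, line in enumerate(lines)' loop; returns on the first matching header line
def pyALoop (lines : List String) (header : String) (items : List String) :
    List String → Nat → List String
  | [], _ => lines
  | line :: rest, idx =>
    if PySem.Str.strip line ≠ header ++ ":" then
      pyALoop lines header items rest (idx + 1)
    else
      let start := idx + 1
      let e := pyFindEnd lines start
      let replacement :=
        if items ≠ [] then items.map (fun item => "- " ++ item) else ["- n/a"]
      PySem.List.slice lines none (some (start : Int)) ++ replacement ++
        PySem.List.slice lines (some (e : Int)) none

def replace_list_section_py (lines : List String) (header : String) (items : List String) : List String :=
  pyALoop lines header items lines 0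

-- ===== PORT B =====
-- single pass with replaced/skipping flags
def pyBLoop (target : String) (replacement : List String) :
    List String → Bool → Bool → List String
  | [], _, _ => []
  | line :: rest, replaced, skipping =>
    if skipping then
      if PySem.Str.startswith (PySem.Str.lstrip line) "-" then
        pyBLoop target replacement rest replaced true
      else
        line :: pyBLoop target replacement rest replaced false
    else if !replaced && (PySem.Str.strip line == target) then
      line :: replacement ++ pyBLoop target replacement rest true true
    else
      line :: pyBLoop target replacement rest replaced skipping

def replace_list_section_py_alt (lines : List String) (header : String) (items : List String) : List String :=
  let target := header ++ ":"
  let replacement :=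
    if items ≠ [] then items.map (fun item => "- " ++ item) else ["- n/a"]
  pyBLoop target replacement lines false false

-- ===== PRECONDITION & SPEC =====
def Spec_replace_list_section_py (lines : List String) (header : String) (items : List String) (out : List String) : Prop := out = replace_list_section_py_alt lines header items
instance (lines : List String) (header : String) (items : List String) (out : List String) : Decidable (Spec_replace_list_section_py lines header items out) := by unfold Spec_replace_list_section_py; infer_instance

-- ===== CLAIM (what is proved, stated in full; the proofs are below) =====
def Claim_equal_replace_list_section_py : Prop := ∀ (lines : List String) (header : String) (items : List String), Dom_replace_list_section_py lines header items → Spec_replace_list_section_py lines header items (replace_list_section_py lines header items)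

-- ===== LEMMAS AND PROOFS =====

def pvDash (line : String) : Bool := PySem.Str.startswith (PySem.Str.lstrip line) "-"

-- once replaced and no longer skipping, B copies the rest verbatim
theorem pyBLoop_done (target : String) (repl : List String) :
    ∀ xs : List String, pyBLoop target repl xs true false = xs := by
  intro xs
  induction xs with
  | nil => simp [pyBLoop]
  | cons l rest ih => simp [pyBLoop, ih]

-- in the skipping state, B drops the leading dash lines and then copies verbatim
theorem pyBLoop_skip (target : String) (repl : List String) :
    ∀ xs : List String, pyBLoop target repl xs true true = xs.dropWhile pvDash := by
  intro xs
  induction xs with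
  | nil => rfl
  | cons l rest ih =>
    simp only [pyBLoop]
    by_cases h : pvDash l
    · rw [if_pos (show PySem.Str.startswith (PySem.Str.lstrip l) "-" = true from h),
        List.dropWhile_cons_of_pos h]
      exact ih
    · have h' : ¬ PySem.Str.startswith (PySem.Str.lstrip l) "-" = true := h
      rw [if_neg h', List.dropWhile_cons_of_neg h, pyBLoop_done]
      simp

-- A's inner while-loop index cut corresponds to dropWhile on the tail
theorem pyFindEnd_drop (lines : List String) :
    ∀ e : Nat, lines.drop (pyFindEnd lines e) = (lines.drop e).dropWhile pvDash := by
  intro e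
  induction hn : lines.length - e using Nat.strong_induction_on generalizing e with
  | _ n ih =>
    by_cases he : e < lines.length
    · rw [List.drop_eq_getElem_cons he]
      have hg : lines.getD e "" = lines[e] := by
        simp [List.getD, List.getElem?_eq_getElem he]
      by_cases hd : pvDash (lines[e])
      · rw [pyFindEnd]
        simp only [he, if_true, hg]
        rw [if_pos (show PySem.Str.startswith (PySem.Str.lstrip lines[e]) "-" = true from hd),
          List.dropWhile_cons_of_pos hd]
        exact ih (lines.length - (e + 1)) (by omega) (e + 1) rfl
      · have hd' : ¬ PySem.Str.startswith (PySem.Str.lstrip lines[e]) "-" = true := hd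
        rw [pyFindEnd]
        simp only [he, if_true, hg]
        rw [if_neg hd', List.dropWhile_cons_of_neg hd]
        exact List.drop_eq_getElem_cons he
    · rw [pyFindEnd, if_neg he]
      have : lines.drop e = [] := List.drop_eq_nil_of_le (by omega)
      simp [this]

-- main invariant: A's loop over the suffix equals prefix-copy plus B's pass on the suffix
theorem pyALoop_eq (lines : List String) (header : String) (items : List String) :
    ∀ (sub : List String) (idx : Nat), sub = lines.drop idx →
      pyALoop lines header items sub idx =
        lines.take idx ++
          pyBLoop (header ++ ":")
            (if items ≠ [] then items.map (fun item => "- " ++ item) else ["- n/a"])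
            sub false false := by
  intro sub
  induction sub with
  | nil =>
    intro idx h
    have : lines.length ≤ idx := by
      by_contra hlt
      push Not at hlt
      have hh := List.drop_eq_getElem_cons hlt
      rw [← h] at hh
      exact List.cons_ne_nil _ _ hh.symm
    simp [pyALoop, pyBLoop, List.take_of_length_le this]
  | cons line rest ih =>
    intro idx h
    have hlt : idx < lines.length := by
      by_contra hge
      push Not at hge
      rw [List.drop_eq_nil_of_le hge] at h
      exact List.cons_ne_nil _ _ h
    have hline : lines[idx] = line := by
      rw [List.drop_eq_getElem_cons hlt] at h
      exact (List.cons.injEq .. ▸ h).1.symm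
    have hrest : rest = lines.drop (idx + 1) := by
      rw [List.drop_eq_getElem_cons hlt] at h
      exact (List.cons.injEq .. ▸ h).2
    have htake : lines.take (idx + 1) = lines.take idx ++ [line] := by
      rw [List.take_add_one, List.getElem?_eq_getElem hlt, hline]
      rfl
    by_cases hm : PySem.Str.strip line = header ++ ":"
    · -- header found here
      rw [pyALoop]
      simp only [hm, ne_eq, not_true_eq_false, if_false]
      rw [pyBLoop]
      simp only [Bool.false_eq_true, if_false, Bool.not_false, Bool.true_and, hm, beq_self_eq_true,
        if_true]
      rw [pyBLoop_skip, PySem.List.slice_to_natCast, PySem.List.slice_from_natCast,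
        pyFindEnd_drop, ← hrest, htake]
      simp
    · rw [pyALoop]
      simp only [hm, ne_eq, not_false_eq_true, if_true]
      rw [pyBLoop]
      have : (PySem.Str.strip line == header ++ ":") = false := by
        simpa using hm
      simp only [Bool.false_eq_true, if_false, this, Bool.and_false, Bool.not_false]
      rw [ih (idx + 1) hrest, htake]
      simp

-- ===== VERDICT (by name: the statement is the Claim_ definition above) =====
theorem replace_list_section_py_spec : Claim_equal_replace_list_section_py := by
  intro lines header items _
  unfold Spec_replace_list_section_py replace_list_section_py replace_list_section_py_alt
  simpa using pyALoop_eq lines header items lines 0 rfl
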